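-- pv_equiv track=rewrite | github.com/MrBrantCode/unitest_baseline | mut_generate/mist_train_cf/cf_74648/solution.py | remove_vowels_digits_and_punctuation
-- ===== SOURCE A (Python) =====
-- def remove_vowels_digits_and_punctuation(text):
--     vowels = 'AEIOUaeiou'
--     digits = '0123456789'
--     punctuation = '!\"#$%&\'()*+,-./:;<=>?@[\\]^_`{|}~\n'
--
--     result = ''
--     for char in text:
--         if char not in vowels and char not in digits and char not in punctuation:
--             result += char
--
--     return result
-- ===== SOURCE B (Python) =====
-- def remove_vowels_digits_and_punctuation(text):
--     # Staged deletion: one full pass over the string per removed character,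
--     # instead of one pass with three membership tests per character.
--     result = text
--     for ch in 'AEIOUaeiou' + '0123456789' + '!\"#$%&\'()*+,-./:;<=>?@[\\]^_`{|}~\n':
--         result = ''.join(c for c in result if c != ch)
--     return result
-- ===== Notes on version B (the rewrite author's own statement) =====
-- stated objective: alternative
-- what changed: Replaces A's single accumulator pass with three membership tests per character by 41 staged deletion passes, each pass removing one character of the removal set by direct equality comparison (no membership test, no accumulator string).
import Mathlib
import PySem

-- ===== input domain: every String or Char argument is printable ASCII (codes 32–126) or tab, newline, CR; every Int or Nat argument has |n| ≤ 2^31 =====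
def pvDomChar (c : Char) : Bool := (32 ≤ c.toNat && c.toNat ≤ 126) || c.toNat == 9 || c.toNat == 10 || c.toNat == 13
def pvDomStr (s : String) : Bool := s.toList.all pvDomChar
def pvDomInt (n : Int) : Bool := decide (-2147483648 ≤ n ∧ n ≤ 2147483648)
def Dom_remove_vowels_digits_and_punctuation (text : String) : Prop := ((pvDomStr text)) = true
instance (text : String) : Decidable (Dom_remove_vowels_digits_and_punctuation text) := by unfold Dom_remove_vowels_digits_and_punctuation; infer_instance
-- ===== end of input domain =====

-- B replaces A's single accumulator pass (three membership tests per character) by staged passes: one full equality-filter pass per removed character (alternative decomposition, similar cost).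


-- ===== PORT A =====
def remove_vowels_digits_and_punctuation (text : String) : String :=
  let vowels := "AEIOUaeiou".toList
  let digits := "0123456789".toList
  let punctuation := "!\"#$%&'()*+,-./:;<=>?@[\\]^_`{|}~\n".toList
  let result : List Char := text.toList.foldl (fun result char =>
    if char ∉ vowels ∧ char ∉ digits ∧ char ∉ punctuation then result ++ [char]
    else result) []
  String.ofList result

-- ===== PORT B =====
-- staged deletion: for each character of the removal string, one filtering pass over the current string
def remove_vowels_digits_and_punctuation_alt (text : String) : String :=
  let removal := ("AEIOUaeiou".toList ++ "0123456789".toList ++ "!\"#$%&'()*+,-./:;<=>?@[\\]^_`{|}~\n".toList)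
  String.ofList (removal.foldl (fun result ch => result.filter (fun c => c != ch)) text.toList)

-- ===== PRECONDITION & SPEC =====
def Spec_remove_vowels_digits_and_punctuation (text : String) (out : String) : Prop := out = remove_vowels_digits_and_punctuation_alt text
instance (text : String) (out : String) : Decidable (Spec_remove_vowels_digits_and_punctuation text out) := by unfold Spec_remove_vowels_digits_and_punctuation; infer_instance

-- ===== CLAIM =====
def Claim_equal_remove_vowels_digits_and_punctuation : Prop := ∀ (text : String), Dom_remove_vowels_digits_and_punctuation text → Spec_remove_vowels_digits_and_punctuation text (remove_vowels_digits_and_punctuation text)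

-- ===== LEMMAS AND PROOFS =====
-- staged one-character deletions compose into one filter against the whole table
theorem pv_foldl_filter_ne (table l : List Char) :
    table.foldl (fun result ch => result.filter (fun c => c != ch)) l
      = l.filter (fun c => !(table.contains c)) := by
  induction table generalizing l with
  | nil => simp
  | cons ch rest ih =>
      rw [List.foldl_cons, ih, List.filter_filter]
      congr 1
      funext c
      cases hc : c == ch <;> cases hr : rest.contains c <;>
        simp_all [bne, List.contains_eq_mem]

-- ===== VERDICT =====
theorem remove_vowels_digits_and_punctuation_spec : Claim_equal_remove_vowels_digits_and_punctuation := by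
  intro text _
  unfold Spec_remove_vowels_digits_and_punctuation
  unfold remove_vowels_digits_and_punctuation remove_vowels_digits_and_punctuation_alt
  simp only [PySem.List.foldl_append_ite_eq_filter, List.nil_append, pv_foldl_filter_ne]
  congr 1
  apply List.filter_congr
  intro c _
  simp [decide_not]
  simp only [Bool.and_assoc]
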